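-- pv_equiv track=rewrite | github.com/lhd2156/SportSync | backend/routers/sports.py | _pick_mlb_playback_urls
-- ===== SOURCE A (Python) =====
-- def _clean_news_text(value: object) -> str:
--     """Collapse line breaks and trim surrounding whitespace in news strings."""
--     if not isinstance(value, str):
--         return ""
--     return " ".join(value.split())
--
-- def _pick_mlb_playback_urls(playbacks: list[dict] | None) -> tuple[str, str]:
--     video_candidates: list[tuple[int, str]] = []
--     hls_url = ""
--
--     for playback in playbacks or []:
--         if not isinstance(playback, dict):
--             continue
--         url = _clean_news_text(str(playback.get("url") or ""))
--         if not url: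
--             continue
--
--         name = _clean_news_text(str(playback.get("name") or "")).lower()
--         if ".m3u8" in url and not hls_url:
--             hls_url = url
--
--         if ".mp4" in url:
--             priority = 0
--             if "mp4avc" in name:
--                 priority = 4
--             elif "highbit" in name:
--                 priority = 3
--             elif "1280x720" in url:
--                 priority = 2
--             video_candidates.append((priority, url))
--
--     video_candidates.sort(key=lambda item: item[0], reverse=True)
--     video_url = video_candidates[0][1] if video_candidates else ""
--     return video_url, hls_url
-- ===== SOURCE B (Python) =====
-- def _clean_news_text(value: object) -> str:
--     """Collapse line breaks and trim surrounding whitespace in news strings."""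
--     if not isinstance(value, str):
--         return ""
--     return " ".join(value.split())
--
-- def _pick_mlb_playback_urls(playbacks):
--     hls_url = ""
--     mp4s = []  # (lowered cleaned name, cleaned url) in encounter order
--
--     for playback in playbacks or []:
--         if not isinstance(playback, dict):
--             continue
--         url = _clean_news_text(str(playback.get("url") or ""))
--         if not url:
--             continue
--         if ".m3u8" in url and not hls_url:
--             hls_url = url
--         if ".mp4" in url:
--             name = _clean_news_text(str(playback.get("name") or "")).lower()
--             mp4s.append((name, url))
--
--     for name, url in mp4s:
--         if "mp4avc" in name:
--             return url, hls_url
--     for name, url in mp4s: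
--         if "highbit" in name:
--             return url, hls_url
--     for name, url in mp4s:
--         if "1280x720" in url:
--             return url, hls_url
--     return (mp4s[0][1] if mp4s else ""), hls_url
-- ===== Notes on version B (the rewrite author's own statement) =====
-- stated objective: alternative
-- what changed: Replaces A's score-every-candidate-then-stable-sort selection with a tiered linear search: one pass collects (name, url) mp4 pairs, then precedence tiers (mp4avc, highbit, 1280x720, any mp4) are scanned in order and the first hit is returned, so no priority scores and no sort exist.
import Mathlib
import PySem

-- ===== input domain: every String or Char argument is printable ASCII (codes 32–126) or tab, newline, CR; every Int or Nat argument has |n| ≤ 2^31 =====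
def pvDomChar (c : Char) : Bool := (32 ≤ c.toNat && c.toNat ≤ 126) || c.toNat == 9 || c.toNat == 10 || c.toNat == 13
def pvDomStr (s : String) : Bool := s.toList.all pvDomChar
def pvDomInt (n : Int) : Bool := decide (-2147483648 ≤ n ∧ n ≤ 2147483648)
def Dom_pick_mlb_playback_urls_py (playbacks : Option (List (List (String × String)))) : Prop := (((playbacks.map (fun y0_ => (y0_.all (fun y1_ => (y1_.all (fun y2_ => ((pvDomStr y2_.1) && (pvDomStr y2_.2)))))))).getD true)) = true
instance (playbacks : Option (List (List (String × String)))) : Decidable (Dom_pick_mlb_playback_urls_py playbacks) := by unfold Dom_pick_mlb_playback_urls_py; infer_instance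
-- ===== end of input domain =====

-- B replaces A's score-then-stable-sort selection with tier-by-tier linear searches
-- over the collected mp4 pairs (objective: alternative decomposition, same cost class).

-- ===== PORT A =====
-- _clean_news_text(value) for a str argument: " ".join(value.split())
def pvClean (s : String) : String := PySem.Str.join " " (PySem.Str.split₀ s)

-- one iteration of A's loop; state = (video_candidates, hls_url)
def pvStepA (acc : List (Int × String) × String) (playback : List (String × String)) :
    List (Int × String) × String :=
  let url := pvClean ((List.lookup "url" playback).getD "")
  if url = "" then acc
  else
    let name := PySem.Str.lower (pvClean ((List.lookup "name" playback).getD ""))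
    let hls := if PySem.Str.isIn ".m3u8" url && acc.2 == "" then url else acc.2
    if PySem.Str.isIn ".mp4" url then
      let priority : Int :=
        if PySem.Str.isIn "mp4avc" name then 4
        else if PySem.Str.isIn "highbit" name then 3
        else if PySem.Str.isIn "1280x720" url then 2
        else 0
      (acc.1 ++ [(priority, url)], hls)
    else (acc.1, hls)

def pick_mlb_playback_urls_py (playbacks : Option (List (List (String × String)))) :
    String × String :=
  let st := (playbacks.getD []).foldl pvStepA ([], "")
  let sortedC := PySem.List.sorted st.1 (fun item => item.1) true
  let video_url := match sortedC with | [] => "" | c :: _ => c.2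
  (video_url, st.2)

-- ===== PORT B =====
-- "for name, url in l: if p(name,url): return url" — first match, as in Source B's tier loops
def pvFirstWhere (p : String × String → Bool) : List (String × String) → Option String
  | [] => none
  | x :: t => if p x then some x.2 else pvFirstWhere p t

-- one iteration of B's loop; state = (hls_url, mp4s)
def pvStepB (acc : String × List (String × String)) (playback : List (String × String)) :
    String × List (String × String) :=
  let url := pvClean ((List.lookup "url" playback).getD "")
  if url = "" then acc
  else
    let hls := if PySem.Str.isIn ".m3u8" url && acc.1 == "" then url else acc.1
    if PySem.Str.isIn ".mp4" url then
      let name := PySem.Str.lower (pvClean ((List.lookup "name" playback).getD ""))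
      (hls, acc.2 ++ [(name, url)])
    else (hls, acc.2)

def pick_mlb_playback_urls_py_alt (playbacks : Option (List (List (String × String)))) :
    String × String :=
  let st := (playbacks.getD []).foldl pvStepB ("", [])
  let mp4s := st.2
  let video_url :=
    match pvFirstWhere (fun p => PySem.Str.isIn "mp4avc" p.1) mp4s with
    | some u => u
    | none =>
      match pvFirstWhere (fun p => PySem.Str.isIn "highbit" p.1) mp4s with
      | some u => u
      | none =>
        match pvFirstWhere (fun p => PySem.Str.isIn "1280x720" p.2) mp4s with
        | some u => u
        | none => match mp4s with | [] => "" | x :: _ => x.2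
  (video_url, st.1)

-- ===== PRECONDITION & SPEC =====
def Spec_pick_mlb_playback_urls_py (playbacks : Option (List (List (String × String)))) (out : String × String) : Prop := out = pick_mlb_playback_urls_py_alt playbacks
instance (playbacks : Option (List (List (String × String)))) (out : String × String) : Decidable (Spec_pick_mlb_playback_urls_py playbacks out) := by unfold Spec_pick_mlb_playback_urls_py; infer_instance

-- ===== CLAIM (what is proved, stated in full; the proofs are below) =====
def Claim_equal_pick_mlb_playback_urls_py : Prop := ∀ (playbacks : Option (List (List (String × String)))), Dom_pick_mlb_playback_urls_py playbacks → Spec_pick_mlb_playback_urls_py playbacks (pick_mlb_playback_urls_py playbacks)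

-- ===== LEMMAS AND PROOFS =====

-- priority tag A assigns to a collected (name, url) pair
def pvTag (p : String × String) : Int × String :=
  (if PySem.Str.isIn "mp4avc" p.1 then 4
   else if PySem.Str.isIn "highbit" p.1 then 3
   else if PySem.Str.isIn "1280x720" p.2 then 2
   else 0, p.2)

-- A's and B's folds keep corresponding states
theorem pvFold_corr (ps : List (List (String × String))) (mp4s : List (String × String))
    (hls : String) :
    ps.foldl pvStepA (mp4s.map pvTag, hls) =
      (((ps.foldl pvStepB (hls, mp4s)).2).map pvTag, (ps.foldl pvStepB (hls, mp4s)).1) := by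
  induction ps generalizing mp4s hls with
  | nil => simp
  | cons x t ih =>
    simp only [List.foldl_cons]
    by_cases hu : pvClean ((List.lookup "url" x).getD "") = ""
    · simp only [pvStepA, pvStepB, hu, if_pos rfl, if_true]
      exact ih mp4s hls
    · by_cases hm : PySem.Str.isIn ".mp4" (pvClean ((List.lookup "url" x).getD "")) = true
      · have := ih (mp4s ++ [(PySem.Str.lower (pvClean ((List.lookup "name" x).getD "")),
          pvClean ((List.lookup "url" x).getD ""))])
          (if PySem.Str.isIn ".m3u8" (pvClean ((List.lookup "url" x).getD "")) && hls == ""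
            then pvClean ((List.lookup "url" x).getD "") else hls)
        simp only [pvStepA, pvStepB, hu, if_neg hu, hm, if_true, List.map_append, List.map] at this ⊢
        simpa [pvTag] using this
      · have := ih mp4s
          (if PySem.Str.isIn ".m3u8" (pvClean ((List.lookup "url" x).getD "")) && hls == ""
            then pvClean ((List.lookup "url" x).getD "") else hls)
        simp only [pvStepA, pvStepB, hu, if_neg hu, hm, if_false, Bool.false_eq_true] at this ⊢
        exact this

-- head of the insertion fold = running strict-max fold (first maximal element wins)
theorem pvHead_insert_fold (cs : List (Int × String)) (acc : List (Int × String)) :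
    ((cs.foldl (fun a x => PySem.List.insertBy (fun a b => decide (b.1 < a.1)) x a) acc).head?) =
      cs.foldl (fun h x => match h with
        | none => some x
        | some m => if m.1 < x.1 then some x else some m) acc.head? := by
  induction cs generalizing acc with
  | nil => rfl
  | cons c t ih =>
    simp only [List.foldl_cons]
    rw [ih]
    congr 1
    cases acc with
    | nil => simp [PySem.List.insertBy]
    | cons y ys =>
      by_cases h : y.1 < c.1
      · simp [PySem.List.insertBy, h]
      · simp [PySem.List.insertBy, h]

-- running strict-max over tagged pairs, as a plain fold over the pairs
def pvG (h : Option (Int × String)) (l : List (String × String)) : Option (Int × String) :=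
  l.foldl (fun h p => match h with
    | none => some (pvTag p)
    | some m => if m.1 < (pvTag p).1 then some (pvTag p) else some m) h

-- the value the tier searches would produce, relative to a current best
def pvRHS (cur : Int × String) (l : List (String × String)) : String :=
  match pvFirstWhere (fun p => PySem.Str.isIn "mp4avc" p.1) l with
  | some u => if 4 ≤ cur.1 then cur.2 else u
  | none =>
    match pvFirstWhere (fun p => PySem.Str.isIn "highbit" p.1) l with
    | some u => if 3 ≤ cur.1 then cur.2 else u
    | none =>
      match pvFirstWhere (fun p => PySem.Str.isIn "1280x720" p.2) l with
      | some u => if 2 ≤ cur.1 then cur.2 else u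
      | none => cur.2

theorem pvCharG (l : List (String × String)) (cur : Int × String) (hc : 0 ≤ cur.1) :
    ((pvG (some cur) l).map Prod.snd).getD "" = pvRHS cur l := by
  induction l generalizing cur with
  | nil => simp [pvG, pvRHS, pvFirstWhere]
  | cons x t ih =>
    by_cases h1 : PySem.Str.isIn "mp4avc" x.1 = true
    · have htag : pvTag x = (4, x.2) := by unfold pvTag; rw [if_pos h1]
      by_cases hcur : cur.1 < 4
      · rw [show pvG (some cur) (x :: t) = pvG (some ((4:Int), x.2)) t from by
          simp [pvG, htag, hcur]]
        rw [ih (4, x.2) (by norm_num)]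
        unfold pvRHS
        simp only [pvFirstWhere, h1, if_pos rfl]
        have h4f : ¬ (4:Int) ≤ cur.1 := by omega
        rcases hfa : pvFirstWhere (fun p => PySem.Str.isIn "mp4avc" p.1) t with _ | u <;>
          rcases hfb : pvFirstWhere (fun p => PySem.Str.isIn "highbit" p.1) t with _ | v <;>
          rcases hfc : pvFirstWhere (fun p => PySem.Str.isIn "1280x720" p.2) t with _ | w <;>
          norm_num [hfa, hfb, hfc, h4f]
      · rw [show pvG (some cur) (x :: t) = pvG (some cur) t from by simp [pvG, htag, hcur]]
        rw [ih cur hc]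
        unfold pvRHS
        simp only [pvFirstWhere, h1, if_pos rfl]
        have h4 : (4:Int) ≤ cur.1 := by omega
        have h3 : (3:Int) ≤ cur.1 := by omega
        have h2 : (2:Int) ≤ cur.1 := by omega
        rcases hfa : pvFirstWhere (fun p => PySem.Str.isIn "mp4avc" p.1) t with _ | u <;>
          rcases hfb : pvFirstWhere (fun p => PySem.Str.isIn "highbit" p.1) t with _ | v <;>
          rcases hfc : pvFirstWhere (fun p => PySem.Str.isIn "1280x720" p.2) t with _ | w <;>
          norm_num [hfa, hfb, hfc, h4, h3, h2]
    · by_cases h2p : PySem.Str.isIn "highbit" x.1 = true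
      · have htag : pvTag x = (3, x.2) := by unfold pvTag; rw [if_neg h1, if_pos h2p]
        by_cases hcur : cur.1 < 3
        · rw [show pvG (some cur) (x :: t) = pvG (some ((3:Int), x.2)) t from by
            simp [pvG, htag, hcur]]
          rw [ih (3, x.2) (by norm_num)]
          unfold pvRHS
          simp only [pvFirstWhere, h1, h2p, if_pos rfl]
          have h4f : ¬ (4:Int) ≤ cur.1 := by omega
          have h3f : ¬ (3:Int) ≤ cur.1 := by omega
          rcases hfa : pvFirstWhere (fun p => PySem.Str.isIn "mp4avc" p.1) t with _ | u <;>
            rcases hfb : pvFirstWhere (fun p => PySem.Str.isIn "highbit" p.1) t with _ | v <;>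
            rcases hfc : pvFirstWhere (fun p => PySem.Str.isIn "1280x720" p.2) t with _ | w <;>
            norm_num [hfa, hfb, hfc, h4f, h3f]
        · rw [show pvG (some cur) (x :: t) = pvG (some cur) t from by simp [pvG, htag, hcur]]
          rw [ih cur hc]
          unfold pvRHS
          simp only [pvFirstWhere, h1, h2p, if_pos rfl]
          have h3 : (3:Int) ≤ cur.1 := by omega
          have h2 : (2:Int) ≤ cur.1 := by omega
          rcases hfa : pvFirstWhere (fun p => PySem.Str.isIn "mp4avc" p.1) t with _ | u <;>
            rcases hfb : pvFirstWhere (fun p => PySem.Str.isIn "highbit" p.1) t with _ | v <;>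
            rcases hfc : pvFirstWhere (fun p => PySem.Str.isIn "1280x720" p.2) t with _ | w <;>
            norm_num [hfa, hfb, hfc, h3, h2]
      · by_cases h3p : PySem.Str.isIn "1280x720" x.2 = true
        · have htag : pvTag x = (2, x.2) := by
            unfold pvTag; rw [if_neg h1, if_neg h2p, if_pos h3p]
          by_cases hcur : cur.1 < 2
          · rw [show pvG (some cur) (x :: t) = pvG (some ((2:Int), x.2)) t from by
              simp [pvG, htag, hcur]]
            rw [ih (2, x.2) (by norm_num)]
            unfold pvRHS
            simp only [pvFirstWhere, h1, h2p, h3p, if_pos rfl]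
            have h4f : ¬ (4:Int) ≤ cur.1 := by omega
            have h3f : ¬ (3:Int) ≤ cur.1 := by omega
            have h2f : ¬ (2:Int) ≤ cur.1 := by omega
            rcases hfa : pvFirstWhere (fun p => PySem.Str.isIn "mp4avc" p.1) t with _ | u <;>
              rcases hfb : pvFirstWhere (fun p => PySem.Str.isIn "highbit" p.1) t with _ | v <;>
              rcases hfc : pvFirstWhere (fun p => PySem.Str.isIn "1280x720" p.2) t with _ | w <;>
              norm_num [hfa, hfb, hfc, h4f, h3f, h2f]
          · rw [show pvG (some cur) (x :: t) = pvG (some cur) t from by simp [pvG, htag, hcur]]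
            rw [ih cur hc]
            unfold pvRHS
            simp only [pvFirstWhere, h1, h2p, h3p, if_pos rfl]
            have h2 : (2:Int) ≤ cur.1 := by omega
            rcases hfa : pvFirstWhere (fun p => PySem.Str.isIn "mp4avc" p.1) t with _ | u <;>
              rcases hfb : pvFirstWhere (fun p => PySem.Str.isIn "highbit" p.1) t with _ | v <;>
              rcases hfc : pvFirstWhere (fun p => PySem.Str.isIn "1280x720" p.2) t with _ | w <;>
              norm_num [hfa, hfb, hfc, h2]
        · have htag : pvTag x = (0, x.2) := by
            unfold pvTag; rw [if_neg h1, if_neg h2p, if_neg h3p]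
          have hcur : ¬ cur.1 < 0 := by omega
          rw [show pvG (some cur) (x :: t) = pvG (some cur) t from by simp [pvG, htag, hcur]]
          rw [ih cur hc]
          unfold pvRHS
          simp only [pvFirstWhere, h1, h2p, h3p]
          rcases hfa : pvFirstWhere (fun p => PySem.Str.isIn "mp4avc" p.1) t with _ | u <;>
            rcases hfb : pvFirstWhere (fun p => PySem.Str.isIn "highbit" p.1) t with _ | v <;>
            rcases hfc : pvFirstWhere (fun p => PySem.Str.isIn "1280x720" p.2) t with _ | w <;>
            norm_num [hfa, hfb, hfc]

-- the selected video url, from any collected mp4 list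
theorem pvSelect (l : List (String × String)) :
    (match PySem.List.sorted (l.map pvTag) (fun item => item.1) true with
      | [] => ""
      | c :: _ => c.2) =
    (match pvFirstWhere (fun p => PySem.Str.isIn "mp4avc" p.1) l with
     | some u => u
     | none =>
       match pvFirstWhere (fun p => PySem.Str.isIn "highbit" p.1) l with
       | some u => u
       | none =>
         match pvFirstWhere (fun p => PySem.Str.isIn "1280x720" p.2) l with
         | some u => u
         | none => match l with | [] => "" | x :: _ => x.2) := by
  have hsort := PySem.List.sorted_rev_eq_foldl_insertBy (l.map pvTag)
    (fun item : Int × String => item.1)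
  have hmatch : ∀ (zs : List (Int × String)),
      (match zs with | [] => "" | c :: _ => c.2) = ((zs.head?).map Prod.snd).getD "" := by
    intro zs; cases zs <;> simp
  rw [hmatch, hsort, pvHead_insert_fold, List.foldl_map]
  cases l with
  | nil => simp [pvFirstWhere]
  | cons x t =>
    have hg : (List.foldl (fun h p => match h with
        | none => some (pvTag p)
        | some m => if m.1 < (pvTag p).1 then some (pvTag p) else some m)
        (List.head? ([] : List (Int × String))) (x :: t)) = pvG (some (pvTag x)) t := by
      simp [pvG]
    rw [hg, pvCharG t (pvTag x) (by unfold pvTag; split_ifs <;> norm_num)]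
    unfold pvRHS
    by_cases h1 : PySem.Str.isIn "mp4avc" x.1 = true
    · have htag : pvTag x = (4, x.2) := by unfold pvTag; rw [if_pos h1]
      simp only [pvFirstWhere, h1, if_pos rfl, htag]
      rcases hfa : pvFirstWhere (fun p => PySem.Str.isIn "mp4avc" p.1) t with _ | u <;>
        rcases hfb : pvFirstWhere (fun p => PySem.Str.isIn "highbit" p.1) t with _ | v <;>
        rcases hfc : pvFirstWhere (fun p => PySem.Str.isIn "1280x720" p.2) t with _ | w <;>
        simp [hfa, hfb, hfc]
    · by_cases h2 : PySem.Str.isIn "highbit" x.1 = true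
      · have htag : pvTag x = (3, x.2) := by unfold pvTag; rw [if_neg h1, if_pos h2]
        simp only [pvFirstWhere, h1, h2, if_pos rfl, htag]
        rcases hfa : pvFirstWhere (fun p => PySem.Str.isIn "mp4avc" p.1) t with _ | u <;>
          rcases hfb : pvFirstWhere (fun p => PySem.Str.isIn "highbit" p.1) t with _ | v <;>
          rcases hfc : pvFirstWhere (fun p => PySem.Str.isIn "1280x720" p.2) t with _ | w <;>
          simp [hfa, hfb, hfc]
      · by_cases h3 : PySem.Str.isIn "1280x720" x.2 = true
        · have htag : pvTag x = (2, x.2) := by unfold pvTag; rw [if_neg h1, if_neg h2, if_pos h3]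
          simp only [pvFirstWhere, h1, h2, h3, if_pos rfl, htag]
          rcases hfa : pvFirstWhere (fun p => PySem.Str.isIn "mp4avc" p.1) t with _ | u <;>
            rcases hfb : pvFirstWhere (fun p => PySem.Str.isIn "highbit" p.1) t with _ | v <;>
            rcases hfc : pvFirstWhere (fun p => PySem.Str.isIn "1280x720" p.2) t with _ | w <;>
            simp [hfa, hfb, hfc]
        · have htag : pvTag x = (0, x.2) := by unfold pvTag; rw [if_neg h1, if_neg h2, if_neg h3]
          simp only [pvFirstWhere, h1, h2, h3, htag]
          rcases hfa : pvFirstWhere (fun p => PySem.Str.isIn "mp4avc" p.1) t with _ | u <;>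
            rcases hfb : pvFirstWhere (fun p => PySem.Str.isIn "highbit" p.1) t with _ | v <;>
            rcases hfc : pvFirstWhere (fun p => PySem.Str.isIn "1280x720" p.2) t with _ | w <;>
            simp [hfa, hfb, hfc]

-- ===== VERDICT (by name: the statement is the Claim_ definition above) =====
theorem pick_mlb_playback_urls_py_spec : Claim_equal_pick_mlb_playback_urls_py := by
  intro playbacks _
  unfold Spec_pick_mlb_playback_urls_py pick_mlb_playback_urls_py pick_mlb_playback_urls_py_alt
  have hc := pvFold_corr (playbacks.getD []) [] ""
  simp only [List.map_nil] at hc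
  rw [hc]
  exact Prod.ext (pvSelect _) rfl
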